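-- pv_equiv track=rewrite | github.com/NimaPasidev/Uom-2025-ai-sessions | session-0/project-eular/smallest_multiple.py | overall_prime_max
-- ===== SOURCE A (Python) =====
-- def overall_prime_max(prime_fac_list,prime_list): # this funtion count the max number of prime factors in the number list
--     prime_count = []
--     for prime in prime_list:
--         highest_count = 0
--         for lista in prime_fac_list:
--             if lista.count(prime)>highest_count:
--                 highest_count = lista.count(prime)
--         prime_count.append([prime,highest_count])
--     return prime_count
-- ===== SOURCE B (Python) =====
-- def overall_prime_max(prime_fac_list, prime_list):
--     # One pass over the factor lists maintaining an aggregate best-count dict,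
--     # instead of rescanning every list for every prime.
--     best = {}
--     for lst in prime_fac_list:
--         for x in lst:
--             c = lst.count(x)
--             if c > best.get(x, 0):
--                 best[x] = c
--     return [[p, best.get(p, 0)] for p in prime_list]
-- ===== Notes on version B (the rewrite author's own statement) =====
-- stated objective: faster
-- what changed: Inverts the loop nesting: one pass over the factor lists builds an aggregate max-count dict, then the output is a single map over prime_list with O(1) lookups, instead of scanning every factor list for every prime.
import Mathlib
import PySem

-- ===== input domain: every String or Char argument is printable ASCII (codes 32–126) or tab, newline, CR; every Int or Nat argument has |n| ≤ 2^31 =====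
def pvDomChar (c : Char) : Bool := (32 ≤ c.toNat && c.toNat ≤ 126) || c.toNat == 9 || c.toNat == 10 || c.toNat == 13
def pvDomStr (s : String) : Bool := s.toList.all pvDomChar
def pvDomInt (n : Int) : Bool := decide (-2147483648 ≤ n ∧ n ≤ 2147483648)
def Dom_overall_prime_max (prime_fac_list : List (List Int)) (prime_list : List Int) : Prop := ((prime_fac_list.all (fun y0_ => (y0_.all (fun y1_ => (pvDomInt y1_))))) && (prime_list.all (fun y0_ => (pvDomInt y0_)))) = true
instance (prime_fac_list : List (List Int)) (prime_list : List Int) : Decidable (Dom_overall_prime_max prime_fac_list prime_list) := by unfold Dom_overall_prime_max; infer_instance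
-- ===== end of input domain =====

-- ===== PORT A =====
def overall_prime_max (prime_fac_list : List (List Int)) (prime_list : List Int) : List (List Int) :=
  prime_list.foldl (fun prime_count prime =>
    let highest_count : Int := prime_fac_list.foldl (fun highest_count lista =>
      if (lista.count prime : Int) > highest_count then (lista.count prime : Int) else highest_count) 0
    prime_count ++ [[prime, highest_count]]) []

-- ===== PORT B =====
-- B: one pass over the factor lists maintaining an aggregate best-count dict; faster by a different loop nesting.
def overall_prime_max_alt (prime_fac_list : List (List Int)) (prime_list : List Int) : List (List Int) :=
  let best : PySem.Dict Int Int := prime_fac_list.foldl (fun best lst =>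
    lst.foldl (fun best x =>
      if (lst.count x : Int) > best.getD x 0 then best.insert x (lst.count x : Int) else best) best) PySem.Dict.empty
  prime_list.map (fun p => [p, best.getD p 0])

-- ===== PRECONDITION & SPEC =====
def Spec_overall_prime_max (prime_fac_list : List (List Int)) (prime_list : List Int) (out : List (List Int)) : Prop := out = overall_prime_max_alt prime_fac_list prime_list
instance (prime_fac_list : List (List Int)) (prime_list : List Int) (out : List (List Int)) : Decidable (Spec_overall_prime_max prime_fac_list prime_list out) := by unfold Spec_overall_prime_max; infer_instance

-- ===== CLAIM (what is proved, stated in full; the proofs are below) =====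
def Claim_equal_overall_prime_max : Prop := ∀ (prime_fac_list : List (List Int)) (prime_list : List Int), Dom_overall_prime_max prime_fac_list prime_list → Spec_overall_prime_max prime_fac_list prime_list (overall_prime_max prime_fac_list prime_list)

-- ===== LEMMAS AND PROOFS =====

-- ===== VERDICT (by name: the statement is the Claim_ definition above) =====
-- inner loop of B: processing one list lst updates the dict entry of p to max(old, lst.count p) iff p occurs in the processed sublist
lemma pv_inner (lst : List Int) (sub : List Int) (d : PySem.Dict Int Int) (p : Int) :
    (sub.foldl (fun best x =>
      if (lst.count x : Int) > best.getD x 0 then best.insert x (lst.count x : Int) else best) d).getD p 0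
    = if p ∈ sub then max (d.getD p 0) (lst.count p : Int) else d.getD p 0 := by
  induction sub generalizing d with
  | nil => simp
  | cons x rest ih =>
    simp only [List.foldl_cons]
    rw [ih]
    have hstep : ((if (lst.count x : Int) > d.getD x 0
          then d.insert x (lst.count x : Int) else d).getD p 0)
        = if p = x then max (d.getD p 0) ((lst.count p : Int)) else d.getD p 0 := by
      by_cases hpx : p = x
      · subst hpx
        rw [if_pos rfl]
        by_cases hc : (lst.count p : Int) > d.getD p 0
        · rw [if_pos hc, PySem.Dict.getD_insert, if_pos rfl]; omega
        · rw [if_neg hc]; omega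
      · rw [if_neg hpx]
        by_cases hc : (lst.count x : Int) > d.getD x 0
        · rw [if_pos hc, PySem.Dict.getD_insert, if_neg hpx]
        · rw [if_neg hc]
    rw [hstep]
    simp only [List.mem_cons]
    by_cases hpx : p = x <;> by_cases hm : p ∈ rest <;> simp [hpx, hm, max_assoc]

-- outer loop of B as a fold of max over the per-list counts of p
lemma pv_outer (lists : List (List Int)) (d : PySem.Dict Int Int) (p : Int)
    (hd : 0 ≤ d.getD p 0) :
    (lists.foldl (fun best lst =>
      lst.foldl (fun best x =>
        if (lst.count x : Int) > best.getD x 0 then best.insert x (lst.count x : Int) else best) best) d).getD p 0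
    = lists.foldl (fun h l => max h (l.count p : Int)) (d.getD p 0) := by
  induction lists generalizing d with
  | nil => rfl
  | cons l rest ih =>
    simp only [List.foldl_cons]
    rw [ih]
    · congr 1
      rw [pv_inner]
      by_cases hm : p ∈ l
      · simp [hm]
      · have : l.count p = 0 := List.count_eq_zero.mpr hm
        simp [hm, this]; omega
    · rw [pv_inner]; split_ifs <;> omega

-- A's inner loop is the same fold of max
lemma pv_a_inner (lists : List (List Int)) (h : Int) (p : Int) :
    lists.foldl (fun highest_count lista =>
      if (lista.count p : Int) > highest_count then (lista.count p : Int) else highest_count) h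
    = lists.foldl (fun h l => max h (l.count p : Int)) h := by
  induction lists generalizing h with
  | nil => rfl
  | cons l rest ih =>
    simp only [List.foldl_cons, ih]
    congr 1
    split_ifs <;> omega

theorem overall_prime_max_spec : Claim_equal_overall_prime_max := by
  intro prime_fac_list prime_list _
  unfold Spec_overall_prime_max overall_prime_max overall_prime_max_alt
  rw [PySem.List.foldl_append_singleton_eq_map]
  simp only [List.nil_append]
  apply List.map_congr_left
  intro p _
  rw [pv_a_inner, pv_outer]
  · rw [PySem.Dict.getD_empty]
  · rw [PySem.Dict.getD_empty]
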